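-- pv_equiv track=rewrite | github.com/TechCodinz/mailsift-ultimate | app.py | detect_provider
-- ===== SOURCE A (Python) =====
-- def detect_provider(email: str) -> str:
--     try:
--         domain = email.split('@', 1)[1].lower()
--     except Exception:
--         return 'other'
--     providers = {
--         'gmail': ['gmail.com', 'googlemail.com'],
--         'yahoo': ['yahoo.com', 'ymail.com'],
--         'outlook': ['outlook.com', 'hotmail.com'],
--         'icloud': ['icloud.com', 'me.com']
--     }
--     for name, domains in providers.items():
--         for d in domains:
--             if domain == d or domain.endswith('.' + d):
--                 return name
--     disposable = ('mailinator.com', 'trashmail.com', '10minutemail.com')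
--     if any(domain.endswith(d) for d in disposable):
--         return 'disposable'
--     if domain.count('.') == 1:
--         return 'corporate'
--     return 'other'
-- ===== SOURCE B (Python) =====
-- _PROVIDER_BY_DOMAIN = {
--     'gmail.com': 'gmail', 'googlemail.com': 'gmail',
--     'yahoo.com': 'yahoo', 'ymail.com': 'yahoo',
--     'outlook.com': 'outlook', 'hotmail.com': 'outlook',
--     'icloud.com': 'icloud', 'me.com': 'icloud',
-- }
-- _DISPOSABLE = ('mailinator.com', 'trashmail.com', '10minutemail.com')
--
--
-- def detect_provider(email: str) -> str:
--     parts = email.split('@', 1)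
--     if len(parts) < 2:
--         return 'other'
--     domain = parts[1].lower()
--     # walk the dot-boundary suffixes of the domain, longest first,
--     # and look each one up in the reverse table
--     suffix = domain
--     while True:
--         name = _PROVIDER_BY_DOMAIN.get(suffix)
--         if name is not None:
--             return name
--         dot = suffix.find('.')
--         if dot == -1:
--             break
--         suffix = suffix[dot + 1:]
--     if any(domain.endswith(d) for d in _DISPOSABLE):
--         return 'disposable'
--     if domain.count('.') == 1:
--         return 'corporate'
--     return 'other'
-- ===== Notes on version B (the rewrite author's own statement) =====
-- stated objective: idiomatic
-- what changed: B replaces A's nested scan over the name->domains table by a reverse-lookup dict (provider domain -> name) queried once per dot-boundary suffix of the domain, walked longest-first.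
import Mathlib
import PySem

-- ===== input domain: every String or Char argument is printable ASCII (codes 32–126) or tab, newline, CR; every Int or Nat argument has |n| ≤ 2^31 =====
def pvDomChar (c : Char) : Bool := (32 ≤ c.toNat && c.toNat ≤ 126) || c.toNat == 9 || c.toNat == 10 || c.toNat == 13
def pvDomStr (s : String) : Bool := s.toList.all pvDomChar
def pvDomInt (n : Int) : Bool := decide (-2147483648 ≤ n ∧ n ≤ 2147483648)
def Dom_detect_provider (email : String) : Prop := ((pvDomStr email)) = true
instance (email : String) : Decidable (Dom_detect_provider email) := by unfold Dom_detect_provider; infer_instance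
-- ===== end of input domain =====

-- B replaces A's linear scan of the provider table by a reverse-lookup dict over the
-- domain's dot-boundary suffixes (objective: idiomatic; same asymptotic cost on this fixed table).

-- ===== PORT A =====
-- the `providers` dict literal of A (name ↦ its domains), in insertion order
def pvProviders : List (String × List String) :=
  [("gmail", ["gmail.com", "googlemail.com"]),
   ("yahoo", ["yahoo.com", "ymail.com"]),
   ("outlook", ["outlook.com", "hotmail.com"]),
   ("icloud", ["icloud.com", "me.com"])]

def detect_provider (email : String) : String :=
  -- try: domain = email.split('@', 1)[1].lower()  /  except: return 'other'
  match PySem.List.pyGet? ((PySem.Str.splitMax? email "@" 1).getD []) 1 with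
  | none => "other"
  | some part =>
    let domain := PySem.Str.lower part
    -- for name, domains in providers.items(): for d in domains: if …: return name
    match pvProviders.findSome? (fun nd =>
        nd.2.findSome? (fun d =>
          if domain == d || PySem.Str.endswith domain ("." ++ d) then some nd.1 else none)) with
    | some name => name
    | none =>
      if (["mailinator.com", "trashmail.com", "10minutemail.com"].any
            (fun d => PySem.Str.endswith domain d)) then "disposable"
      else if PySem.Str.count domain "." == 1 then "corporate"
      else "other"

-- ===== PORT B =====
-- B's reverse table: provider domain ↦ provider name
def pvProviderByDomain : PySem.Dict String String :=
  PySem.Dict.mk [("gmail.com", "gmail"), ("googlemail.com", "gmail"),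
    ("yahoo.com", "yahoo"), ("ymail.com", "yahoo"),
    ("outlook.com", "outlook"), ("hotmail.com", "outlook"),
    ("icloud.com", "icloud"), ("me.com", "icloud")]

-- B's `while True` suffix walk, with fuel (each step drops past the first dot, so
-- `length + 1` steps always suffice)
def provLookupGo : Nat → List Char → Option String
  | 0, _ => none
  | fuel + 1, cs =>
    match pvProviderByDomain.get? (String.ofList cs) with
    | some name => some name
    | none =>
      let dot := PySem.Chars.find cs ['.']
      if dot = -1 then none
      else provLookupGo fuel (cs.drop (dot.toNat + 1))

def detect_provider_alt (email : String) : String :=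
  let parts := (PySem.Str.splitMax? email "@" 1).getD []
  if parts.length < 2 then "other"
  else
    let domain := PySem.Str.lower ((PySem.List.pyGet? parts 1).getD "")
    match provLookupGo (domain.toList.length + 1) domain.toList with
    | some name => name
    | none =>
      if (["mailinator.com", "trashmail.com", "10minutemail.com"].any
            (fun d => PySem.Str.endswith domain d)) then "disposable"
      else if PySem.Str.count domain "." == 1 then "corporate"
      else "other"

-- ===== PRECONDITION & SPEC =====
def Spec_detect_provider (email : String) (out : String) : Prop := out = detect_provider_alt email
instance (email : String) (out : String) : Decidable (Spec_detect_provider email out) := by unfold Spec_detect_provider; infer_instance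

-- ===== CLAIM (what is proved, stated in full; the proofs are below) =====
def Claim_equal_detect_provider : Prop := ∀ (email : String), Dom_detect_provider email → Spec_detect_provider email (detect_provider email)

-- ===== LEMMAS AND PROOFS =====

-- normalised provider condition: the domain IS d, or ends with '.' ++ d
def condN (cs : List Char) (d : String) : Bool :=
  decide (cs = d.toList) || decide (('.' :: d.toList) <:+ cs)

-- A's provider scan, phrased over List Char with condN
def chainN (cs : List Char) : Option String :=
  pvProviders.findSome? (fun nd =>
    nd.2.findSome? (fun d => if condN cs d then some nd.1 else none))

lemma ofList_beq (cs : List Char) (d : String) :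
    (String.ofList cs == d) = decide (cs = d.toList) := by
  rw [Bool.eq_iff_iff, beq_iff_eq, decide_eq_true_eq]
  constructor
  · intro h; rw [← h]; simp
  · intro h; rw [h, String.ofList_toList]

lemma cond_eq (cs : List Char) (d : String) :
    (String.ofList cs == d || PySem.Str.endswith (String.ofList cs) ("." ++ d)) = condN cs d := by
  have hdot : ("." : String).toList = ['.'] := by decide
  rw [condN, ofList_beq, PySem.Str.endswith_eq, String.toList_ofList, String.toList_append, hdot]
  congr 1
  rw [Bool.eq_iff_iff, PySem.Chars.endswith_iff, decide_eq_true_eq]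
  rfl

lemma chainA_eq (s : String) :
    pvProviders.findSome? (fun nd =>
      nd.2.findSome? (fun d =>
        if s == d || PySem.Str.endswith s ("." ++ d) then some nd.1 else none)) =
    chainN s.toList := by
  conv_lhs => rw [← String.ofList_toList (s := s)]
  simp only [chainN, cond_eq]

lemma go_succ (fuel : Nat) (cs : List Char) :
    provLookupGo (fuel + 1) cs =
      match pvProviderByDomain.get? (String.ofList cs) with
      | some name => some name
      | none =>
        if PySem.Chars.find cs ['.'] = -1 then none
        else provLookupGo fuel (cs.drop ((PySem.Chars.find cs ['.']).toNat + 1)) := rfl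

-- dot-boundary suffix step: a '.'-led suffix of pre ++ '.' :: rest with pre dot-free
-- is rest itself or a '.'-led suffix of rest
lemma dot_step (pre rest t : List Char) (hpre : ('.' : Char) ∉ pre) :
    ('.' :: t) <:+ (pre ++ '.' :: rest) ↔ (rest = t ∨ ('.' :: t) <:+ rest) := by
  constructor
  · rintro ⟨u, hu⟩
    rcases List.append_eq_append_iff.mp hu with ⟨w, hw1, hw2⟩ | ⟨w, hw1, hw2⟩
    · cases w with
      | nil => left; simpa using hw2.symm
      | cons c w' =>
        exfalso
        have hc : c = '.' := by simpa using (congrArg (fun l => l.head?) hw2).symm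
        exact hpre (by rw [hw1, hc]; simp)
    · cases w with
      | nil => left; simpa using hw2
      | cons c w' =>
        right
        have hrest : rest = w' ++ '.' :: t := by simpa using congrArg List.tail hw2
        exact ⟨w', hrest.symm⟩
  · rintro (rfl | ⟨w, hw⟩)
    · exact ⟨pre, rfl⟩
    · exact ⟨pre ++ '.' :: w, by rw [← hw]; simp⟩

lemma singleton_infix_of_mem {c : Char} {cs : List Char} (h : c ∈ cs) : [c] <:+: cs := by
  obtain ⟨s, t, rfl⟩ := List.append_of_mem h
  exact ⟨s, t, by simp⟩

lemma go_eq (fuel : Nat) (cs : List Char) (h : cs.length < fuel) :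
    provLookupGo fuel cs = chainN cs := by
  induction fuel generalizing cs with
  | zero => omega
  | succ fuel ih =>
    by_cases hk : String.ofList cs ∈ pvProviderByDomain.keys
    · -- the suffix walk hits the full domain immediately: it is a table key
      simp only [pvProviderByDomain, PySem.Dict.keys_mk, List.map_cons, List.map_nil,
        List.mem_cons, List.not_mem_nil, or_false] at hk
      rcases hk with hk | hk | hk | hk | hk | hk | hk | hk <;>
          (replace hk := congrArg String.toList hk;
           simp only [String.toList_ofList] at hk; subst hk; rw [go_succ])
      · exact (by decide : (some "gmail" : Option String) = chainN (String.toList "gmail.com"))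
      · exact (by decide : (some "gmail" : Option String) = chainN (String.toList "googlemail.com"))
      · exact (by decide : (some "yahoo" : Option String) = chainN (String.toList "yahoo.com"))
      · exact (by decide : (some "yahoo" : Option String) = chainN (String.toList "ymail.com"))
      · exact (by decide : (some "outlook" : Option String) = chainN (String.toList "outlook.com"))
      · exact (by decide : (some "outlook" : Option String) = chainN (String.toList "hotmail.com"))
      · exact (by decide : (some "icloud" : Option String) = chainN (String.toList "icloud.com"))
      · exact (by decide : (some "icloud" : Option String) = chainN (String.toList "me.com"))
    · have hget : pvProviderByDomain.get? (String.ofList cs) = none :=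
        (PySem.Dict.get?_eq_none_iff_not_mem_keys _ _).mpr hk
      rw [go_succ, hget]
      by_cases hdot : PySem.Chars.find cs ['.'] = -1
      · -- no dot at all: no provider condition can hold
        rw [if_pos hdot]
        have hno : ('.' : Char) ∉ cs := fun hc =>
          (PySem.Chars.find_eq_neg_one_iff cs ['.']).mp hdot (singleton_infix_of_mem hc)
        have hfalse : ∀ d : String, ('.' : Char) ∈ d.toList → condN cs d = false := by
          intro d hd
          simp only [condN, Bool.or_eq_false_iff, decide_eq_false_iff_not]
          exact ⟨fun h' => hno (h' ▸ hd), fun h' => hno (h'.subset (by simp))⟩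
        simp [chainN, pvProviders, hfalse "gmail.com" (by decide), hfalse "googlemail.com" (by decide),
          hfalse "yahoo.com" (by decide), hfalse "ymail.com" (by decide),
          hfalse "outlook.com" (by decide), hfalse "hotmail.com" (by decide),
          hfalse "icloud.com" (by decide), hfalse "me.com" (by decide)]
      · -- drop past the first dot; every provider condition is preserved
        rw [if_neg hdot]
        have h0 : 0 ≤ PySem.Chars.find cs ['.'] := by
          have := PySem.Chars.neg_one_le_find cs ['.']; omega
        obtain ⟨hpref, hmin⟩ := PySem.Chars.find_spec h0
        set n := (PySem.Chars.find cs ['.']).toNat with hn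
        obtain ⟨u, hu⟩ := hpref
        have hu' : cs.drop n = '.' :: u := by simpa using hu.symm
        have hu2 : u = cs.drop (n + 1) := by rw [← List.tail_drop, hu', List.tail_cons]
        have hdropn : cs.drop n = '.' :: cs.drop (n + 1) := by rw [hu', hu2]
        have hsplit : cs = cs.take n ++ '.' :: cs.drop (n + 1) := by
          conv_lhs => rw [← List.take_append_drop n cs]
          rw [hdropn]
        have hlen : n < cs.length := by
          by_contra hge
          have hnil : cs.drop n = [] := List.drop_eq_nil_of_le (by omega)
          rw [hnil] at hdropn; cases hdropn
        have hpre : ('.' : Char) ∉ cs.take n := by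
          intro hmem
          obtain ⟨i, hi, hig⟩ := List.getElem_of_mem hmem
          have hi' : i < n ∧ i < cs.length := by simpa using hi
          have hci : cs[i] = '.' := by
            rw [← List.getElem_take (h := hi)]; exact hig
          refine hmin i hi'.1 ⟨cs.drop (i + 1), ?_⟩
          rw [List.drop_eq_getElem_cons hi'.2, hci]; rfl
        have hrec := ih (cs.drop (n + 1)) (by rw [List.length_drop]; omega)
        rw [hrec]
        -- condition preservation per provider domain
        have hstep : ∀ d : String, d ∈ pvProviderByDomain.keys →
            condN cs d = condN (cs.drop (n + 1)) d := by
          intro d hd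
          have hne : cs ≠ d.toList := by
            intro hcd
            exact hk (by rw [hcd, String.ofList_toList]; exact hd)
          have hiff := dot_step (cs.take n) (cs.drop (n + 1)) d.toList hpre
          rw [← hsplit] at hiff
          simp only [condN, hiff, Bool.decide_or, hne, decide_false, Bool.false_or]
        simp only [chainN, pvProviders, List.findSome?_cons, List.findSome?_nil, hstep "gmail.com" (by decide), hstep "googlemail.com" (by decide),
          hstep "yahoo.com" (by decide), hstep "ymail.com" (by decide),
          hstep "outlook.com" (by decide), hstep "hotmail.com" (by decide),
          hstep "icloud.com" (by decide), hstep "me.com" (by decide)]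

-- ===== VERDICT (by name: the statement is the Claim_ definition above) =====
theorem detect_provider_spec : Claim_equal_detect_provider := by
  intro email _
  unfold Spec_detect_provider detect_provider detect_provider_alt
  generalize (PySem.Str.splitMax? email "@" 1).getD [] = parts
  match parts with
  | [] => decide
  | [a] =>
    have hg : PySem.List.pyGet? ([a] : List String) 1 = none := by
      simp [PySem.List.pyGet?, PySem.List.pyIdx?]
    rw [hg, if_pos (by simp)]
  | a :: b :: t =>
    have hg : PySem.List.pyGet? (a :: b :: t : List String) 1 = some b := by
      simp [PySem.List.pyGet?, PySem.List.pyIdx?]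
    rw [hg, if_neg (by simp)]
    simp only []
    rw [go_eq ((PySem.Str.lower ((PySem.List.pyGet? (a :: b :: t) 1).getD "")).toList.length + 1)
          _ (Nat.lt_succ_self _)]
    rw [hg]
    simp only [Option.getD_some]
    rw [← chainA_eq (PySem.Str.lower b)]
    exact rfl
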